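-- pv_equiv track=rewrite | github.com/maddytess/skill2adk | escher-adk-packages/domain.compliance.audit/tools/azure_run_iso27001_audit/azure_run_iso27001_audit.py | _ports_in_ranges
-- ===== SOURCE A (Python) =====
-- def _ports_in_ranges(port_ranges: list, target_ports: set) -> set:
--     """Return which target_ports are covered by the given list of port range strings.
--
--     Each entry may itself be comma-separated (e.g. "22, 3389") as returned by
--     the Azure SDK for rules created via the portal or ARM templates.
--     """
--     matched = set()
--     for pr in port_ranges:
--         # Flatten comma-separated entries before parsing
--         for token in str(pr).split(","):
--             token = token.strip()
--             if token == "*":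
--                 return set(target_ports)
--             if "-" in token:
--                 try:
--                     lo, hi = token.split("-", 1)
--                     r = range(int(lo), int(hi) + 1)
--                     matched |= {p for p in target_ports if p in r}
--                 except ValueError:
--                     pass
--             else:
--                 try:
--                     if int(token) in target_ports:
--                         matched.add(int(token))
--                 except ValueError:
--                     pass
--     return matched
-- ===== SOURCE B (Python) =====
-- def _ports_in_ranges(port_ranges: list, target_ports: set) -> set:
--     """Return which target_ports are covered by the given port range strings.
--
--     Two phases: flatten and parse every token once into inclusive (lo, hi)
--     intervals, then sweep the intervals once over a shrinking pool of
--     not-yet-covered targets, moving covered ports out of the pool.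
--     """
--     tokens = [t.strip() for pr in port_ranges for t in str(pr).split(",")]
--     if "*" in tokens:
--         return set(target_ports)
--     intervals = []
--     for tok in tokens:
--         if "-" in tok:
--             lo, hi = tok.split("-", 1)
--         else:
--             lo = hi = tok
--         try:
--             intervals.append((int(lo), int(hi)))
--         except ValueError:
--             pass
--     covered = []
--     remaining = list(dict.fromkeys(target_ports))
--     for lo, hi in intervals:
--         still = []
--         for p in remaining:
--             (covered if lo <= p <= hi else still).append(p)
--         remaining = still
--     return set(covered)
-- ===== Notes on version B (the rewrite author's own statement) =====
-- stated objective: alternative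
-- what changed: A parses tokens inline and unions a freshly built comprehension set of covered targets into an accumulator per range token; B first flattens and parses all tokens once into inclusive (lo,hi) intervals, then sweeps the intervals once over a shrinking pool of not-yet-covered targets, moving covered ports out of the pool so already-covered targets are never rescanned.
import Mathlib
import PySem

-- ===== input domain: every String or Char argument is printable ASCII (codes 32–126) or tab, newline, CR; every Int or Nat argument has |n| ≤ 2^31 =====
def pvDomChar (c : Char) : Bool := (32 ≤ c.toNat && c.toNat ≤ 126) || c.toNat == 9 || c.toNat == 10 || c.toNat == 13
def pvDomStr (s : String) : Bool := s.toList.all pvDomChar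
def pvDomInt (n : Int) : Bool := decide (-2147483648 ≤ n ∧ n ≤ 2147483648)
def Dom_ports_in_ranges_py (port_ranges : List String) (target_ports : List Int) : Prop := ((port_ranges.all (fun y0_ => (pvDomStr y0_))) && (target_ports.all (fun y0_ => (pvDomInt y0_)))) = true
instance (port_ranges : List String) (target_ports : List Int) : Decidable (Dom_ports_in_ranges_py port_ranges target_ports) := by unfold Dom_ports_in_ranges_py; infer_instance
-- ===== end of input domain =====

-- B replaces A's per-token inline parsing and set unions by one parse pass into interval
-- records followed by a single sweep over a shrinking pool of uncovered targets
-- (objective: alternative; a genuinely different traversal of similar cost).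


-- ===== PORT A =====
-- one token (already stripped, not "*"): the body of A's inner loop below the "*" test
def pvMatchA (targets : List Int) (matched : List Int) (token : String) : List Int :=
  if PySem.Str.isIn "-" token then
    match PySem.Str.splitMax? token "-" 1 with
    | some [lo, hi] =>
      match PySem.Int.ofStr? lo, PySem.Int.ofStr? hi with
      | some l, some h =>
        PySem.Set.update matched
          (targets.foldl (fun acc p => if l ≤ p ∧ p < h + 1 then PySem.Set.add acc p else acc)
            PySem.Set.empty)
      | _, _ => matched      -- int() raised ValueError: token skipped
    | _ => matched           -- unreachable: split with "-" present yields two pieces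
  else
    match PySem.Int.ofStr? token with
    | some v => if v ∈ targets then PySem.Set.add matched v else matched
    | none => matched        -- int() raised ValueError: token skipped

-- A's inner loop over the comma-split pieces; Sum.inl = the early `return set(target_ports)`
def pvInnerA (targets : List Int) : List String → List Int → (List Int) ⊕ (List Int)
  | [], matched => Sum.inr matched
  | piece :: rest, matched =>
    let token := PySem.Str.strip piece
    if token = "*" then Sum.inl (PySem.Set.ofList targets)
    else pvInnerA targets rest (pvMatchA targets matched token)

-- A's outer loop over port_ranges
def pvOuterA (targets : List Int) : List String → List Int → (List Int) ⊕ (List Int)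
  | [], matched => Sum.inr matched
  | pr :: rest, matched =>
    match pvInnerA targets ((PySem.Str.split? pr ",").getD []) matched with
    | Sum.inl res => Sum.inl res
    | Sum.inr m => pvOuterA targets rest m

def ports_in_ranges_py (port_ranges : List String) (target_ports : List Int) : List Int :=
  match pvOuterA target_ports port_ranges PySem.Set.empty with
  | Sum.inl res => res
  | Sum.inr m => m

-- ===== PORT B =====
-- parse one stripped token into an inclusive (lo, hi) interval (B's intervals-loop body)
def pvParseTok (tok : String) : Option (Int × Int) :=
  if PySem.Str.isIn "-" tok then
    match PySem.Str.splitMax? tok "-" 1 with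
    | some [lo, hi] =>
      match PySem.Int.ofStr? lo, PySem.Int.ofStr? hi with
      | some l, some h => some (l, h)
      | _, _ => none
    | _ => none
  else (PySem.Int.ofStr? tok).map (fun v => (v, v))

def ports_in_ranges_py_alt (port_ranges : List String) (target_ports : List Int) : List Int :=
  let tokens := port_ranges.flatMap
    (fun pr => ((PySem.Str.split? pr ",").getD []).map PySem.Str.strip)
  if tokens.contains "*" then PySem.Set.ofList target_ports
  else
    let intervals := tokens.foldl
      (fun acc tok => match pvParseTok tok with
        | some r => acc ++ [r]
        | none => acc) []
    -- the sweep: (covered, remaining); each interval moves its hits out of the pool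
    let st := intervals.foldl
      (fun (st : List Int × List Int) r =>
        st.2.foldl
          (fun (cs : List Int × List Int) p =>
            if r.1 ≤ p ∧ p ≤ r.2 then (cs.1 ++ [p], cs.2) else (cs.1, cs.2 ++ [p]))
          (st.1, []))
      (([] : List Int), PySem.Set.ofList target_ports)
    PySem.Set.ofList st.1

-- ===== PRECONDITION & SPEC =====
def Spec_ports_in_ranges_py (port_ranges : List String) (target_ports : List Int) (out : List Int) : Prop := out = ports_in_ranges_py_alt port_ranges target_ports
instance (port_ranges : List String) (target_ports : List Int) (out : List Int) : Decidable (Spec_ports_in_ranges_py port_ranges target_ports out) := by unfold Spec_ports_in_ranges_py; infer_instance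

-- ===== CLAIM (what is proved, stated in full; the proofs are below) =====
def Claim_equal_ports_in_ranges_py : Prop := ∀ (port_ranges : List String) (target_ports : List Int), Dom_ports_in_ranges_py port_ranges target_ports → Spec_ports_in_ranges_py port_ranges target_ports (ports_in_ranges_py port_ranges target_ports)

-- ===== LEMMAS AND PROOFS =====

-- the flattened, stripped token stream both programs process
def pvToks (prs : List String) : List String :=
  prs.flatMap (fun pr => ((PySem.Str.split? pr ",").getD []).map PySem.Str.strip)

def pvCov (r : Int × Int) (p : Int) : Bool := decide (r.1 ≤ p ∧ p ≤ r.2)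

-- index of the first rule covering p
def pvFIdx (p : Int) : List (Int × Int) → Option Nat
  | [] => none
  | r :: rs => if pvCov r p then some 0 else (pvFIdx p rs).map (· + 1)

-- what one parsed rule does to A's accumulator
def pvStepR (targets matched : List Int) (r : Int × Int) : List Int :=
  PySem.Set.update matched (PySem.Set.ofList (targets.filter (pvCov r)))

-- A's per-token step, expressed through the shared parser
def pvStepTok (targets : List Int) (m : List Int) (tok : String) : List Int :=
  match pvParseTok tok with
  | some r => pvStepR targets m r
  | none => m

-- the common normal form: pool elements grouped by the first rule covering them
def pvGrp (rem : List Int) (rs : List (Int × Int)) : List Int :=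
  (List.range rs.length).flatMap
    (fun i => rem.filter (fun p => pvFIdx p rs == some i))

def pvGroups (targets : List Int) (rs : List (Int × Int)) : List Int :=
  pvGrp (PySem.Set.ofList targets) rs

-- ---- generic list/set lemmas ----

theorem pv_foldl_add_mem {s : List Int} {l : List Int} (h : ∀ x ∈ l, x ∈ s) :
    List.foldl PySem.Set.add s l = s := by
  induction l with
  | nil => rfl
  | cons x t ih =>
    have hx : x ∈ s := h x (by simp)
    have : PySem.Set.add s x = s := by
      simp [PySem.Set.add, PySem.Set.contains, hx]
    simp only [List.foldl_cons, this]
    exact ih (fun y hy => h y (by simp [hy]))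

theorem pv_ofList_filter (l : List Int) (q : Int → Bool) :
    PySem.Set.ofList (l.filter q) = (PySem.Set.ofList l).filter q := by
  have key : ∀ (l : List Int) (s : List Int),
      List.foldl PySem.Set.add (s.filter q) (l.filter q)
        = (List.foldl PySem.Set.add s l).filter q := by
    intro l
    induction l with
    | nil => intro s; rfl
    | cons x t ih =>
      intro s
      by_cases hq : q x
      · have : PySem.Set.add (s.filter q) x = (PySem.Set.add s x).filter q := by
          by_cases hm : x ∈ s
          · simp [PySem.Set.add, PySem.Set.contains, hm, hq]
          · simp [PySem.Set.add, PySem.Set.contains, hm, hq, List.filter_append]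
        simp only [List.filter_cons_of_pos hq, List.foldl_cons, this]
        exact ih (PySem.Set.add s x)
      · have : (PySem.Set.add s x).filter q = s.filter q := by
          by_cases hm : x ∈ s
          · simp [PySem.Set.add, PySem.Set.contains, hm]
          · simp [PySem.Set.add, PySem.Set.contains, hm, hq, List.filter_append]
        simp only [List.filter_cons_of_neg (by simpa using hq), List.foldl_cons, ← this]
        exact ih (PySem.Set.add s x)
  simpa using key l []

theorem pv_foldl_add_if (l : List Int) (c : Int → Prop) [DecidablePred c] (s : List Int) :
    l.foldl (fun acc p => if c p then PySem.Set.add acc p else acc) s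
      = List.foldl PySem.Set.add s (l.filter (fun p => decide (c p))) := by
  induction l generalizing s with
  | nil => rfl
  | cons x t ih =>
    by_cases hc : c x
    · simp [hc, ih]
    · simp [hc, ih]

theorem pv_foldl_stepTok (targets : List Int) :
    ∀ (l : List String) (acc : List Int),
      l.foldl (pvStepTok targets) acc
        = (l.filterMap pvParseTok).foldl (pvStepR targets) acc := by
  intro l
  induction l with
  | nil => intro acc; rfl
  | cons x t ih =>
    intro acc
    cases hf : pvParseTok x <;> simp [pvStepTok, hf, ih]

theorem pv_foldl_append_filterMap :
    ∀ (l : List String) (acc : List (Int × Int)),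
      l.foldl (fun acc tok => match pvParseTok tok with | some r => acc ++ [r] | none => acc) acc
        = acc ++ l.filterMap pvParseTok := by
  intro l
  induction l with
  | nil => intro acc; simp
  | cons x t ih =>
    intro acc
    cases hf : pvParseTok x <;> simp [hf, ih]

-- ---- pvFIdx facts ----

theorem pv_fIdx_lt (p : Int) : ∀ (rs : List (Int × Int)) (i : Nat),
    pvFIdx p rs = some i → i < rs.length := by
  intro rs
  induction rs with
  | nil => intro i h; simp [pvFIdx] at h
  | cons r t ih =>
    intro i h
    by_cases hc : pvCov r p
    · simp [pvFIdx, hc] at h; simp [List.length_cons]; omega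
    · simp [pvFIdx, hc] at h
      obtain ⟨j, hj, rfl⟩ := h
      have := ih j hj
      simp; omega

theorem pv_fIdx_append (p : Int) (rs ss : List (Int × Int)) :
    pvFIdx p (rs ++ ss) = (pvFIdx p rs).or ((pvFIdx p ss).map (· + rs.length)) := by
  induction rs with
  | nil => simp [pvFIdx]
  | cons r t ih =>
    by_cases hc : pvCov r p
    · simp [pvFIdx, hc]
    · simp [pvFIdx, hc, ih]
      cases pvFIdx p t <;> cases pvFIdx p ss <;> simp [Option.or]
      omega

-- ---- A-side characterisation ----

theorem pv_ofList_single (v : Int) (l : List Int) :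
    PySem.Set.ofList (l.filter (pvCov (v, v))) = if v ∈ l then [v] else [] := by
  have hf : l.filter (pvCov (v, v)) = l.filter (fun x => x == v) := by
    apply List.filter_congr
    intro x _
    by_cases hx : x = v
    · subst hx; simp [pvCov]
    · have h1 : pvCov (v, v) x = false := by
        simp only [pvCov, decide_eq_false_iff_not]
        omega
      have h2 : (x == v) = false := by simp [hx]
      rw [h1, h2]
  rw [hf, List.filter_beq]
  by_cases hm : v ∈ l
  · have hc : 0 < l.count v := List.count_pos_iff.mpr hm
    obtain ⟨n, hn⟩ : ∃ n, l.count v = n + 1 := ⟨l.count v - 1, by omega⟩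
    rw [hn, List.replicate_succ]
    show List.foldl PySem.Set.add PySem.Set.empty (v :: List.replicate n v) = if v ∈ l then [v] else []
    simp only [List.foldl_cons]
    have h1 : PySem.Set.add PySem.Set.empty v = [v] := rfl
    rw [h1, pv_foldl_add_mem (by intro x hx; rw [List.eq_of_mem_replicate hx]; simp)]
    simp [hm]
  · rw [List.count_eq_zero.mpr hm, if_neg hm]
    rfl

theorem pv_mem_groups (targets : List Int) (rs : List (Int × Int)) (p : Int) :
    p ∈ pvGroups targets rs ↔ p ∈ targets ∧ (pvFIdx p rs).isSome := by
  simp only [pvGroups, pvGrp, List.mem_flatMap, List.mem_range, List.mem_filter,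
    PySem.Set.mem_ofList, beq_iff_eq]
  constructor
  · rintro ⟨i, hi, hp, hf⟩
    exact ⟨hp, by simp [hf]⟩
  · rintro ⟨hp, hs⟩
    obtain ⟨i, hi⟩ := Option.isSome_iff_exists.mp hs
    exact ⟨i, pv_fIdx_lt p rs i hi, hp, hi⟩

theorem pv_A_char (targets : List Int) : ∀ (rs : List (Int × Int)),
    List.foldl (pvStepR targets) [] rs = pvGroups targets rs := by
  intro rs
  induction rs using List.reverseRecOn with
  | nil => rfl
  | append_singleton t r ih =>
    rw [List.foldl_append, ih, List.foldl_cons, List.foldl_nil]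
    have hG : ∀ y, y ∈ pvGroups targets t ↔ y ∈ targets ∧ (pvFIdx y t).isSome :=
      fun y => pv_mem_groups targets t y
    -- unfold the step
    have step : pvStepR targets (pvGroups targets t) r
        = pvGroups targets t
          ++ (PySem.Set.ofList targets).filter
              (fun y => pvCov r y && !(pvFIdx y t).isSome) := by
      rw [pvStepR, PySem.Set.update_eq_append_filter,
        PySem.Set.ofList_eq_self_of_nodup _ (PySem.Set.nodup_ofList _),
        pv_ofList_filter, List.filter_filter]
      congr 1
      apply List.filter_congr
      intro y hy
      have hyt : y ∈ targets := by
        have := PySem.Set.mem_ofList targets y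
        exact this.mp hy
      by_cases hm : y ∈ pvGroups targets t
      · have : (pvFIdx y t).isSome := ((hG y).mp hm).2
        simp [PySem.Set.contains, hm, this]
      · have : ¬ (pvFIdx y t).isSome := fun hs => hm ((hG y).mpr ⟨hyt, hs⟩)
        simp [PySem.Set.contains, hm, this]
    rw [step]
    -- now compute pvGroups targets (t ++ [r])
    have hlen : (t ++ [r]).length = t.length + 1 := by simp
    conv_rhs => rw [pvGroups, pvGrp, hlen, List.range_succ, List.flatMap_append]
    congr 1
    · -- old groups are unchanged
      rw [pvGroups, pvGrp]
      apply List.flatMap_congr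
      intro i hi
      have hi' : i < t.length := List.mem_range.mp hi
      apply List.filter_congr
      intro p _
      rw [pv_fIdx_append]
      cases hf : pvFIdx p t with
      | some j => simp [Option.or]
      | none =>
        simp only [Option.or]
        by_cases hc : pvCov r p
        · simp [pvFIdx, hc]
          omega
        · simp [pvFIdx, hc]
    · -- the new group
      simp only [List.flatMap_cons, List.flatMap_nil, List.append_nil]
      apply List.filter_congr
      intro p _
      rw [pv_fIdx_append]
      cases hf : pvFIdx p t with
      | some j =>
        have : j < t.length := pv_fIdx_lt p t j hf
        simp [Option.or]
        omega
      | none =>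
        simp only [Option.or]
        by_cases hc : pvCov r p
        · simp [pvFIdx, hc]
        · simp [pvFIdx, hc]

theorem pv_matchA_eq (targets matched : List Int) (tok : String) :
    pvMatchA targets matched tok = pvStepTok targets matched tok := by
  unfold pvMatchA pvStepTok pvParseTok
  by_cases hin : PySem.Str.isIn "-" tok
  · simp only [hin, if_true]
    cases hs : PySem.Str.splitMax? tok "-" 1 with
    | none => rfl
    | some parts =>
      rcases parts with _ | ⟨lo, _ | ⟨hi, _ | _⟩⟩
      · rfl
      · rfl
      · show (match PySem.Int.ofStr? lo, PySem.Int.ofStr? hi with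
              | some l, some h =>
                PySem.Set.update matched
                  (targets.foldl
                    (fun acc p => if l ≤ p ∧ p < h + 1 then PySem.Set.add acc p else acc)
                    PySem.Set.empty)
              | _, _ => matched)
            = match (match PySem.Int.ofStr? lo, PySem.Int.ofStr? hi with
                     | some l, some h => some (l, h)
                     | _, _ => none) with
              | some r => pvStepR targets matched r
              | none => matched
        cases hl : PySem.Int.ofStr? lo with
        | none => cases hh : PySem.Int.ofStr? hi <;> rfl
        | some l =>
          cases hh : PySem.Int.ofStr? hi with
          | none => rfl
          | some h =>
            show PySem.Set.update matched
                (targets.foldl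
                  (fun acc p => if l ≤ p ∧ p < h + 1 then PySem.Set.add acc p else acc)
                  PySem.Set.empty)
              = pvStepR targets matched (l, h)
            have hset : targets.foldl
                (fun acc p => if l ≤ p ∧ p < h + 1 then PySem.Set.add acc p else acc)
                PySem.Set.empty
                = PySem.Set.ofList (targets.filter (pvCov (l, h))) := by
              rw [pv_foldl_add_if]
              have hfil : targets.filter (fun p => decide (l ≤ p ∧ p < h + 1))
                  = targets.filter (pvCov (l, h)) := by
                apply List.filter_congr
                intro x _
                simp only [pvCov, decide_eq_decide]
                omega
              rw [hfil]
              rfl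
            rw [hset]
            rfl
      · rfl
  · simp only [hin]
    cases hv : PySem.Int.ofStr? tok with
    | none => rfl
    | some v =>
      show (if v ∈ targets then PySem.Set.add matched v else matched)
        = pvStepR targets matched (v, v)
      rw [pvStepR, pv_ofList_single]
      by_cases hm : v ∈ targets
      · simp only [hm, if_true]
        rfl
      · simp only [hm, if_false]
        rfl

theorem pv_innerA_star (targets : List Int) : ∀ (pieces : List String) (matched : List Int),
    "*" ∈ pieces.map PySem.Str.strip →
    pvInnerA targets pieces matched = Sum.inl (PySem.Set.ofList targets) := by
  intro pieces
  induction pieces with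
  | nil => intro matched h; simp at h
  | cons q t ih =>
    intro matched h
    by_cases hq : PySem.Str.strip q = "*"
    · simp [pvInnerA, hq]
    · have ht : "*" ∈ t.map PySem.Str.strip := by
        simp only [List.map_cons, List.mem_cons] at h
        rcases h with h1 | h1
        · exact absurd h1.symm hq
        · exact h1
      simp [pvInnerA, hq, ih _ ht]

theorem pv_innerA_no_star (targets : List Int) : ∀ (pieces : List String) (matched : List Int),
    "*" ∉ pieces.map PySem.Str.strip →
    pvInnerA targets pieces matched
      = Sum.inr ((pieces.map PySem.Str.strip).foldl (pvMatchA targets) matched) := by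
  intro pieces
  induction pieces with
  | nil => intro matched _; rfl
  | cons q t ih =>
    intro matched h
    have hq : ¬ (PySem.Str.strip q = "*") := by
      intro hc; exact h (by simp [hc])
    have ht : "*" ∉ t.map PySem.Str.strip := by
      intro hc; exact h (by simp [hc])
    simp [pvInnerA, hq, ih _ ht]

theorem pv_outerA_star (targets : List Int) : ∀ (prs : List String) (matched : List Int),
    "*" ∈ pvToks prs →
    pvOuterA targets prs matched = Sum.inl (PySem.Set.ofList targets) := by
  intro prs
  induction prs with
  | nil => intro matched h; simp [pvToks] at h
  | cons pr t ih =>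
    intro matched h
    rw [pvToks, List.flatMap_cons] at h
    rcases List.mem_append.mp h with h1 | h1
    · rw [pvOuterA, pv_innerA_star targets _ matched h1]
    · by_cases h2 : "*" ∈ ((PySem.Str.split? pr ",").getD []).map PySem.Str.strip
      · rw [pvOuterA, pv_innerA_star targets _ matched h2]
      · rw [pvOuterA, pv_innerA_no_star targets _ matched h2]
        exact ih _ h1

theorem pv_outerA_no_star (targets : List Int) : ∀ (prs : List String) (matched : List Int),
    "*" ∉ pvToks prs →
    pvOuterA targets prs matched = Sum.inr ((pvToks prs).foldl (pvMatchA targets) matched) := by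
  intro prs
  induction prs with
  | nil => intro matched _; rfl
  | cons pr t ih =>
    intro matched h
    rw [pvToks, List.flatMap_cons] at h ⊢
    have h1 : "*" ∉ ((PySem.Str.split? pr ",").getD []).map PySem.Str.strip := by
      intro hc; exact h (List.mem_append.mpr (Or.inl hc))
    have h2 : "*" ∉ t.flatMap (fun pr => ((PySem.Str.split? pr ",").getD []).map PySem.Str.strip) := by
      intro hc; exact h (List.mem_append.mpr (Or.inr hc))
    rw [pvOuterA, pv_innerA_no_star targets _ matched h1]
    rw [List.foldl_append]
    exact ih _ h2

-- ---- B-side characterisation: the sweep computes the same groups ----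

-- one interval's partition pass
theorem pv_inner_sweep (r : Int × Int) :
    ∀ (rem cov still : List Int),
    rem.foldl
        (fun (cs : List Int × List Int) p =>
          if r.1 ≤ p ∧ p ≤ r.2 then (cs.1 ++ [p], cs.2) else (cs.1, cs.2 ++ [p]))
        (cov, still)
      = (cov ++ rem.filter (pvCov r), still ++ rem.filter (fun p => !pvCov r p)) := by
  intro rem
  induction rem with
  | nil => intro cov still; simp
  | cons p t ih =>
    intro cov still
    by_cases hc : r.1 ≤ p ∧ p ≤ r.2
    · have hb : pvCov r p = true := by simp [pvCov, hc]
      simp [hc, ih, hb]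
    · have hb : pvCov r p = false := by simp [pvCov]; omega
      simp [hc, ih, hb]

theorem pv_grp_cons (rem : List Int) (r : Int × Int) (rs : List (Int × Int)) :
    pvGrp rem (r :: rs)
      = rem.filter (pvCov r) ++ pvGrp (rem.filter (fun p => !pvCov r p)) rs := by
  rw [pvGrp, pvGrp]
  have hlen : (r :: rs).length = rs.length + 1 := rfl
  rw [hlen, List.range_succ_eq_map, List.flatMap_cons, List.flatMap_map]
  congr 1
  · apply List.filter_congr
    intro p _
    by_cases hc : pvCov r p
    · simp [pvFIdx, hc]
    · simp [pvFIdx, hc]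
  · apply List.flatMap_congr
    intro i _
    rw [List.filter_filter]
    apply List.filter_congr
    intro p _
    by_cases hc : pvCov r p
    · simp [pvFIdx, hc]
    · simp [pvFIdx, hc]

theorem pv_sweep_char :
    ∀ (rs : List (Int × Int)) (cov rem : List Int),
    rs.foldl
        (fun (st : List Int × List Int) r =>
          st.2.foldl
            (fun (cs : List Int × List Int) p =>
              if r.1 ≤ p ∧ p ≤ r.2 then (cs.1 ++ [p], cs.2) else (cs.1, cs.2 ++ [p]))
            (st.1, []))
        (cov, rem)
      = (cov ++ pvGrp rem rs,
         rem.filter (fun p => !(pvFIdx p rs).isSome)) := by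
  intro rs
  induction rs with
  | nil =>
    intro cov rem
    simp [pvGrp, pvFIdx, List.filter_eq_self.mpr]
  | cons r t ih =>
    intro cov rem
    simp only [List.foldl_cons]
    rw [pv_inner_sweep, List.nil_append, ih, pv_grp_cons, List.append_assoc,
      List.filter_filter]
    congr 1
    apply List.filter_congr
    intro p _
    by_cases hc : pvCov r p
    · simp [pvFIdx, hc]
    · simp [pvFIdx, hc]

-- membership and nodup of the groups list
theorem pv_grp_subset (rem : List Int) (rs : List (Int × Int)) :
    ∀ x ∈ pvGrp rem rs, x ∈ rem := by
  intro x hx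
  rw [pvGrp, List.mem_flatMap] at hx
  obtain ⟨i, _, hxi⟩ := hx
  exact (List.mem_filter.mp hxi).1

theorem pv_grp_nodup : ∀ (rs : List (Int × Int)) (rem : List Int),
    rem.Nodup → (pvGrp rem rs).Nodup := by
  intro rs
  induction rs with
  | nil => intro rem _; simp [pvGrp]
  | cons r t ih =>
    intro rem hnd
    rw [pv_grp_cons]
    apply List.Nodup.append
    · exact hnd.filter _
    · exact ih _ (hnd.filter _)
    · intro x hx1 hx2
      have hc : pvCov r x = true := (List.mem_filter.mp hx1).2
      have hx2' := pv_grp_subset _ _ x hx2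
      have hc' : (!pvCov r x) = true := (List.mem_filter.mp hx2').2
      simp [hc] at hc'

-- ===== VERDICT (by name: the statement is the Claim_ definition above) =====
theorem ports_in_ranges_py_spec : Claim_equal_ports_in_ranges_py := by
  intro prs targets _
  unfold Spec_ports_in_ranges_py ports_in_ranges_py ports_in_ranges_py_alt
  by_cases hstar : "*" ∈ pvToks prs
  · rw [pv_outerA_star targets prs PySem.Set.empty hstar]
    have hc : (prs.flatMap
        (fun pr => ((PySem.Str.split? pr ",").getD []).map PySem.Str.strip)).contains "*"
        = true := by
      exact List.contains_iff_mem.mpr hstar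
    simp only [hc, if_true]
  · rw [pv_outerA_no_star targets prs PySem.Set.empty hstar]
    have hc : (prs.flatMap
        (fun pr => ((PySem.Str.split? pr ",").getD []).map PySem.Str.strip)).contains "*"
        = false := by
      rw [Bool.eq_false_iff]
      intro hcc
      exact hstar (List.contains_iff_mem.mp hcc)
    simp only [hc, Bool.false_eq_true, if_false]
    rw [show List.flatMap
        (fun pr => List.map PySem.Str.strip ((PySem.Str.split? pr ",").getD [])) prs
        = pvToks prs from rfl]
    have hfun : pvMatchA targets = pvStepTok targets :=
      funext fun m => funext fun tok => pv_matchA_eq targets m tok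
    show (pvToks prs).foldl (pvMatchA targets) PySem.Set.empty = _
    rw [hfun, pv_foldl_stepTok targets (pvToks prs) PySem.Set.empty]
    show List.foldl (pvStepR targets) [] ((pvToks prs).filterMap pvParseTok) = _
    rw [pv_A_char]
    rw [pv_foldl_append_filterMap, List.nil_append, pv_sweep_char]
    show pvGroups targets ((pvToks prs).filterMap pvParseTok)
      = PySem.Set.ofList ([] ++ pvGrp (PySem.Set.ofList targets) ((pvToks prs).filterMap pvParseTok))
    rw [List.nil_append,
      PySem.Set.ofList_eq_self_of_nodup _
        (pv_grp_nodup _ _ (PySem.Set.nodup_ofList targets))]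
    rfl
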